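-- pv_equiv track=rewrite | github.com/sheed17/neyma-platform | pipeline/dentist_profile.py | _practice_type_from_focus
-- ===== SOURCE A (Python) =====
-- from typing import Dict, Any, List, Optional
--
-- PROCEDURE_MEDIUM = ["cleaning", "general dentistry", "checkup", "filling", "crown", "root canal", "extraction", "x-ray"]
--
-- def _practice_type_from_focus(procedure_focus: List[str]) -> str:
--     if any(p in ["orthodontic", "braces", "invisalign"] for p in procedure_focus):
--         return "orthodontic"
--     if any(p in ["cosmetic", "veneer", "whitening", "bonding"] for p in procedure_focus):
--         return "cosmetic"
--     if len(procedure_focus) > 3 or ("implant" in procedure_focus and "cosmetic" in procedure_focus):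
--         return "multi_specialty"
--     if any(p in PROCEDURE_MEDIUM for p in procedure_focus) or procedure_focus:
--         return "general_dentistry"
--     return "unknown"
-- ===== SOURCE B (Python) =====
-- PROCEDURE_MEDIUM = ["cleaning", "general dentistry", "checkup", "filling", "crown", "root canal", "extraction", "x-ray"]
--
-- def _practice_type_from_focus(procedure_focus):
--     # Single pass: set flags and count; then apply the priority cascade.
--     has_ortho = has_cosmetic = False
--     n = 0
--     for p in procedure_focus:
--         n += 1
--         if p in ("orthodontic", "braces", "invisalign"):
--             has_ortho = True
--         elif p in ("cosmetic", "veneer", "whitening", "bonding"):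
--             has_cosmetic = True
--     if has_ortho:
--         return "orthodontic"
--     if has_cosmetic:
--         return "cosmetic"
--     if n > 3:
--         return "multi_specialty"
--     if n > 0:
--         return "general_dentistry"
--     return "unknown"
-- ===== Notes on version B (the rewrite author's own statement) =====
-- stated objective: simpler
-- what changed: Replaces A's four separate short-circuit any()/membership scans with a single pass that sets ortho/cosmetic flags and counts elements, followed by a flag cascade; the implant&cosmetic and PROCEDURE_MEDIUM tests drop out because they are unreachable/redundant after the earlier branches.
import Mathlib
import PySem

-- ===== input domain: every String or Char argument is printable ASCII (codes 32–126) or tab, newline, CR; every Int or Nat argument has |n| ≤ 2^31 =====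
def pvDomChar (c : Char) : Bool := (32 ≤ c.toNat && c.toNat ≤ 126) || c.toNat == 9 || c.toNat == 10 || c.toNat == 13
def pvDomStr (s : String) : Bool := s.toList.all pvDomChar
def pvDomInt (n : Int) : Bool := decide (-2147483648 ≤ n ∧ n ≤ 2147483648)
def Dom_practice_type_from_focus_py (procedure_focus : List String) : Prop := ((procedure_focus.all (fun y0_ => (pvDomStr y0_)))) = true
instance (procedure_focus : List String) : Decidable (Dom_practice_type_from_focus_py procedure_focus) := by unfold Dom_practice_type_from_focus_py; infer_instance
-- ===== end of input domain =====

-- B replaces A's repeated any()/membership scans with one pass setting flags and a count, then a flag cascade (objective: simpler; not faster).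
-- ===== PORT A =====
def PROCEDURE_MEDIUM : List String := ["cleaning", "general dentistry", "checkup", "filling", "crown", "root canal", "extraction", "x-ray"]

def practice_type_from_focus_py (procedure_focus : List String) : String :=
  if procedure_focus.any (fun p => (["orthodontic", "braces", "invisalign"] : List String).contains p) then "orthodontic"
  else if procedure_focus.any (fun p => (["cosmetic", "veneer", "whitening", "bonding"] : List String).contains p) then "cosmetic"
  else if procedure_focus.length > 3 || (procedure_focus.contains "implant" && procedure_focus.contains "cosmetic") then "multi_specialty"
  else if procedure_focus.any (fun p => PROCEDURE_MEDIUM.contains p) || !procedure_focus.isEmpty then "general_dentistry"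
  else "unknown"

-- ===== PORT B =====
-- one pass: (has_ortho, has_cosmetic, count)
def pvAltStep (s : Bool × Bool × Nat) (p : String) : Bool × Bool × Nat :=
  if ((["orthodontic", "braces", "invisalign"] : List String).contains p) then (true, s.2.1, s.2.2 + 1)
  else if ((["cosmetic", "veneer", "whitening", "bonding"] : List String).contains p) then (s.1, true, s.2.2 + 1)
  else (s.1, s.2.1, s.2.2 + 1)

def practice_type_from_focus_py_alt (procedure_focus : List String) : String :=
  let st := procedure_focus.foldl pvAltStep (false, false, 0)
  if st.1 then "orthodontic"
  else if st.2.1 then "cosmetic"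
  else if st.2.2 > 3 then "multi_specialty"
  else if st.2.2 > 0 then "general_dentistry"
  else "unknown"

-- ===== PRECONDITION & SPEC =====
def Spec_practice_type_from_focus_py (procedure_focus : List String) (out : String) : Prop := out = practice_type_from_focus_py_alt procedure_focus
instance (procedure_focus : List String) (out : String) : Decidable (Spec_practice_type_from_focus_py procedure_focus out) := by unfold Spec_practice_type_from_focus_py; infer_instance

-- ===== CLAIM (what is proved, stated in full; the proofs are below) =====
def Claim_equal_practice_type_from_focus_py : Prop := ∀ (procedure_focus : List String), Dom_practice_type_from_focus_py procedure_focus → Spec_practice_type_from_focus_py procedure_focus (practice_type_from_focus_py procedure_focus)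

-- ===== LEMMAS AND PROOFS =====

-- ===== VERDICT (by name: the statement is the Claim_ definition above) =====
-- fold-state characterisation
theorem pvAltLoop_eq (l : List String) : ∀ (a b : Bool) (n : Nat),
    l.foldl pvAltStep (a, b, n)
      = (a || l.any (fun p => (["orthodontic", "braces", "invisalign"] : List String).contains p),
         b || l.any (fun p => !((["orthodontic", "braces", "invisalign"] : List String).contains p)
                    && (["cosmetic", "veneer", "whitening", "bonding"] : List String).contains p),
         n + l.length) := by
  induction l with
  | nil => simp
  | cons x xs ih =>
    intro a b n
    simp only [List.foldl_cons, List.any_cons, List.length_cons, pvAltStep]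
    cases h1 : ((["orthodontic", "braces", "invisalign"] : List String).contains x) with
    | true =>
      rw [if_pos rfl, ih, Prod.mk.injEq, Prod.mk.injEq]
      refine ⟨?_, ?_, by omega⟩ <;> simp
    | false =>
      rw [if_neg (by simp)]
      cases h2 : ((["cosmetic", "veneer", "whitening", "bonding"] : List String).contains x) with
      | true =>
        rw [if_pos rfl, ih, Prod.mk.injEq, Prod.mk.injEq]
        refine ⟨?_, ?_, by omega⟩ <;> simp
      | false =>
        rw [if_neg (by simp), ih, Prod.mk.injEq, Prod.mk.injEq]
        refine ⟨?_, ?_, by omega⟩ <;> simp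

theorem cos_imp_not_ortho (p : String)
    (h : ((["cosmetic", "veneer", "whitening", "bonding"] : List String).contains p) = true) :
    ((["orthodontic", "braces", "invisalign"] : List String).contains p) = false := by
  have hp : p = "cosmetic" ∨ p = "veneer" ∨ p = "whitening" ∨ p = "bonding" := by simpa using h
  rcases hp with rfl | rfl | rfl | rfl <;> decide

theorem practice_type_from_focus_py_spec : Claim_equal_practice_type_from_focus_py := by
  intro l _
  show practice_type_from_focus_py l = practice_type_from_focus_py_alt l
  unfold practice_type_from_focus_py practice_type_from_focus_py_alt
  rw [pvAltLoop_eq]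
  simp only [Bool.false_or, Nat.zero_add]
  cases hO : l.any (fun p => (["orthodontic", "braces", "invisalign"] : List String).contains p) with
  | true => simp only [if_true]
  | false =>
    simp only [Bool.false_eq_true, if_false]
    have hcos : (l.any (fun p => !((["orthodontic", "braces", "invisalign"] : List String).contains p)
        && (["cosmetic", "veneer", "whitening", "bonding"] : List String).contains p))
        = l.any (fun p => (["cosmetic", "veneer", "whitening", "bonding"] : List String).contains p) := by
      congr 1
      funext p
      cases hc : ((["cosmetic", "veneer", "whitening", "bonding"] : List String).contains p) with
      | true => rw [cos_imp_not_ortho p hc]; rfl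
      | false => exact Bool.and_false _
    rw [hcos]
    cases hC : l.any (fun p => (["cosmetic", "veneer", "whitening", "bonding"] : List String).contains p) with
    | true => simp only [if_true]
    | false =>
      simp only [Bool.false_eq_true, if_false]
      have hcosmem : l.contains "cosmetic" = false := by
        cases h : l.contains "cosmetic" with
        | true =>
          have hm : "cosmetic" ∈ l := by simpa using h
          have := List.any_eq_false.mp hC _ hm
          simp at this
        | false => rfl
      simp only [hcosmem, Bool.and_false, Bool.or_false]
      by_cases h3 : l.length > 3
      · simp only [h3, decide_true, if_pos]
      · simp only [h3, decide_false, Bool.false_eq_true, if_false]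
        by_cases hne : l = []
        · subst hne; simp
        · have he : l.isEmpty = false := by simp [hne]
          have h0 : l.length > 0 := List.length_pos_iff.mpr hne
          simp only [he, Bool.not_false, Bool.or_true, if_true, h0]
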